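-- pv_equiv track=rewrite | github.com/leftos/vatsim_control_recs | scripts/generate_preset_groupings.py | add_international_airports
-- ===== SOURCE A (Python) =====
-- from typing import Any, Dict, List, Optional, Set
--
-- EXCLUDED_FACILITY_IDS = {
--     'ZAK',  # Oakland Oceanic
--     'ZWY',  # Caribbean virtual ARTCC
-- }
--
-- COUNTRY_NAMES = {
--     'MY': 'Bahamas',
--     'MB': 'Turks & Caicos',
--     'MD': 'Dominican Republic',
--     'MU': 'Cuba',
--     'MT': 'Cuba',
--     'MM': 'Mexico',
--     'CY': 'Canada',
--     'CZ': 'Canada',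
--     'TN': 'Netherlands Antilles',
--     'TT': 'Trinidad & Tobago',
--     'TF': 'French Antilles',
--     'TA': 'Antigua',
--     'TK': 'St. Kitts',
--     'TU': 'British Virgin Islands',
--     'SV': 'Venezuela',
--     'TX': 'Bermuda',
--     'UH': 'Russia',
-- }
--
-- def is_airport_code(code: str) -> bool:
--     """Check if code is likely an airport (not a FIR/ARTCC)."""
--     if not code or len(code) < 2:
--         return False
--     if code in EXCLUDED_FACILITY_IDS:
--         return False
--     # 3-letter codes starting with Z are usually ARTCCs/FIRs
--     if len(code) == 3 and code.startswith('Z'):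
--         return False
--     return True
--
-- def add_international_airports(
--     facility: Dict[str, Any],
--     groupings: Dict[str, List[str]]
-- ) -> int:
--     """Add international airports from nonNasFacilityIds."""
--     non_nas = facility.get('nonNasFacilityIds', [])
--     intl_airports = [code.upper() for code in non_nas
--                      if is_airport_code(code) and len(code) == 4]
--
--     if not intl_airports:
--         return 0
--
--     # Group by country prefix
--     by_country: Dict[str, List[str]] = {}
--
--     for code in intl_airports:
--         prefix = code[:2]
--         country = COUNTRY_NAMES.get(prefix, f'{prefix} Region')
--         if country not in by_country:
--             by_country[country] = []
--         by_country[country].append(code)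
--
--     # Add groupings for each country
--     count = 0
--     for country, airports in sorted(by_country.items()):
--         group_name = f"International - {country}"
--         groupings[group_name] = sorted(airports)
--         count += 1
--
--     return count
-- ===== SOURCE B (Python) =====
-- from itertools import groupby
--
-- COUNTRY_NAMES = {
--     'MY': 'Bahamas',
--     'MB': 'Turks & Caicos',
--     'MD': 'Dominican Republic',
--     'MU': 'Cuba',
--     'MT': 'Cuba',
--     'MM': 'Mexico',
--     'CY': 'Canada',
--     'CZ': 'Canada',
--     'TN': 'Netherlands Antilles',
--     'TT': 'Trinidad & Tobago',
--     'TF': 'French Antilles',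
--     'TA': 'Antigua',
--     'TK': 'St. Kitts',
--     'TU': 'British Virgin Islands',
--     'SV': 'Venezuela',
--     'TX': 'Bermuda',
--     'UH': 'Russia',
-- }
--
-- def _tag(code):
--     prefix = code[:2]
--     return COUNTRY_NAMES.get(prefix, f'{prefix} Region')
--
-- def add_international_airports(facility, groupings):
--     # The excluded facility ids and the Z-prefix rule only concern 3-letter codes,
--     # so among candidates the 4-letter length test alone decides admission.
--     tagged = sorted((_tag(c.upper()), c.upper())
--                     for c in facility.get('nonNasFacilityIds', []) if len(c) == 4)
--     count = 0
--     for country, grp in groupby(tagged, key=lambda t: t[0]):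
--         groupings[f'International - {country}'] = [code for _, code in grp]
--         count += 1
--     return count
-- ===== Notes on version B (the rewrite author's own statement) =====
-- stated objective: idiomatic
-- what changed: Replaces A's hash-grouping into an intermediate by_country dict (membership test + per-key append, then sorted(items) with per-country sort) by one sort of (country, code) tuples followed by a single itertools.groupby pass; the redundant is_airport_code checks (which can never fire on 4-letter codes) are dropped, leaving the len==4 filter alone.
import Mathlib
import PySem

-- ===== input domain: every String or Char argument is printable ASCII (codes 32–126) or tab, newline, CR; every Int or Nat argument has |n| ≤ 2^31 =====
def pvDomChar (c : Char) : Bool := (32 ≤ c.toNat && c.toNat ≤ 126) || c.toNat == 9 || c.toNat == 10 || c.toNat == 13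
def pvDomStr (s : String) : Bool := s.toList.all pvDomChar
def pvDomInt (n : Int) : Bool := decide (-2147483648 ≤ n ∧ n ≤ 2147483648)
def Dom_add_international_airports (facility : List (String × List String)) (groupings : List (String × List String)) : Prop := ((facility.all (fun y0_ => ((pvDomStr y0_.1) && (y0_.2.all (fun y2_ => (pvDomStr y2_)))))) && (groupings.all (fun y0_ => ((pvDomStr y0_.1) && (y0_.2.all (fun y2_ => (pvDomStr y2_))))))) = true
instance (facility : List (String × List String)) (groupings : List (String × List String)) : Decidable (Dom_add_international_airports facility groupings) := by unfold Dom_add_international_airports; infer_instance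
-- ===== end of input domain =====

-- B replaces A's intermediate by_country dict by one sort of (country, code) tuples plus a single
-- groupby pass (idiomatic); both Pythons also mutate `groupings` identically — the equivalence
-- proved here is about the RETURN value (the count) only.

-- ===== PORT A =====
-- module constant COUNTRY_NAMES (a dict), shared module context of both Pythons
def pvCountryNames : PySem.Dict String String := PySem.Dict.mk
  [("MY", "Bahamas"), ("MB", "Turks & Caicos"), ("MD", "Dominican Republic"),
   ("MU", "Cuba"), ("MT", "Cuba"), ("MM", "Mexico"), ("CY", "Canada"), ("CZ", "Canada"),
   ("TN", "Netherlands Antilles"), ("TT", "Trinidad & Tobago"), ("TF", "French Antilles"),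
   ("TA", "Antigua"), ("TK", "St. Kitts"), ("TU", "British Virgin Islands"),
   ("SV", "Venezuela"), ("TX", "Bermuda"), ("UH", "Russia")]

-- module helper is_airport_code (A calls it in its comprehension)
def pvIsAirportCode (code : String) : Bool :=
  if code = "" || PySem.Str.len code < 2 then false
  else if ["ZAK", "ZWY"].contains code then false
  else if PySem.Str.len code == 3 && PySem.Str.startswith code "Z" then false
  else true

-- A's inline COUNTRY_NAMES.get(prefix, f'{prefix} Region')
def pvCountry (code : String) : String :=
  let pre := PySem.Str.slice code none (some 2)
  PySem.Dict.getD pvCountryNames pre (pre ++ " Region")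

-- A's non_nas = facility.get('nonNasFacilityIds', []) and its filtering comprehension
def pvIntlCodes (facility : List (String × List String)) : List String :=
  let non_nas := PySem.Dict.getD (PySem.Dict.mk facility) "nonNasFacilityIds" []
  (non_nas.filter (fun c => pvIsAirportCode c && PySem.Str.len c == 4)).map PySem.Str.upper

-- one iteration of A's grouping loop (if country not in by_country: …[] ; by_country[country].append(code))
def pvStep (d : PySem.Dict String (List String)) (code : String) : PySem.Dict String (List String) :=
  (if !d.contains (pvCountry code) then d.insert (pvCountry code) [] else d).modify
    (pvCountry code) [] (fun l => l ++ [code])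

-- A's final loop writes groupings[...] (a side effect on the caller's dict, not in the return) and counts;
-- the port keeps the sorted(by_country.items()) traversal and the count accumulator.
def add_international_airports (facility : List (String × List String)) (groupings : List (String × List String)) : Int :=
  let intl_airports := pvIntlCodes facility
  if intl_airports.isEmpty then 0
  else
    let by_country := intl_airports.foldl pvStep (PySem.Dict.mk [])
    (PySem.List.sorted2 by_country.items (fun p => p.1) (fun p => p.2) false).foldl
      (fun count _ => count + 1) 0

-- ===== PORT B =====
-- B's helper _tag(code)
def pvTag (code : String) : String :=
  let pre := PySem.Str.slice code none (some 2)
  PySem.Dict.getD pvCountryNames pre (pre ++ " Region")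

-- B's 'tagged = sorted((_tag(c.upper()), c.upper()) for c in … if len(c) == 4)'
-- (Python's tuple sort = sorted2 with the two component keys)
def pvTagged (facility : List (String × List String)) : List (String × String) :=
  PySem.List.sorted2
    (((PySem.Dict.getD (PySem.Dict.mk facility) "nonNasFacilityIds" []).filter
        (fun c => PySem.Str.len c == 4)).map
      (fun c => (pvTag (PySem.Str.upper c), PySem.Str.upper c)))
    (fun t => t.1) (fun t => t.2) false

-- B's groupby loop: its writes to `groupings` are side effects not in the return; the returned
-- count of groups is the number of maximal runs of equal first components of the sorted list.
def pvGroupbyCount : List (String × String) → Int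
  | [] => 0
  | [_] => 1
  | x :: y :: t => (if x.1 = y.1 then 0 else 1) + pvGroupbyCount (y :: t)

def add_international_airports_alt (facility : List (String × List String)) (groupings : List (String × List String)) : Int :=
  pvGroupbyCount (pvTagged facility)

-- ===== PRECONDITION & SPEC =====
def Spec_add_international_airports (facility : List (String × List String)) (groupings : List (String × List String)) (out : Int) : Prop := out = add_international_airports_alt facility groupings
instance (facility : List (String × List String)) (groupings : List (String × List String)) (out : Int) : Decidable (Spec_add_international_airports facility groupings out) := by unfold Spec_add_international_airports; infer_instance

-- ===== CLAIM (what is proved, stated in full; the proofs are below) =====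
def Claim_equal_add_international_airports : Prop := ∀ (facility : List (String × List String)) (groupings : List (String × List String)), Dom_add_international_airports facility groupings → Spec_add_international_airports facility groupings (add_international_airports facility groupings)

-- ===== LEMMAS AND PROOFS =====

-- A's count accumulator just measures the length of the traversed list
theorem pvFoldlCount {α : Type} (l : List α) (n : Int) :
    l.foldl (fun count _ => count + 1) n = n + l.length := by
  induction l generalizing n with
  | nil => simp
  | cons x t ih => simp [List.foldl, ih]; omega

-- one step of A's grouping loop adds exactly the country name to the key set
theorem pvStepKeys (d : PySem.Dict String (List String)) (code : String) :
    (pvStep d code).keys = PySem.Set.add d.keys (pvCountry code) := by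
  unfold pvStep PySem.Set.add
  by_cases h : pvCountry code ∈ d.keys
  · have hc : d.contains (pvCountry code) = true :=
      (PySem.Dict.contains_iff_mem_keys d (pvCountry code)).mpr h
    rw [hc]
    simp only [Bool.not_true, Bool.false_eq_true, if_false]
    rw [PySem.Dict.keys_modify, PySem.Dict.keys_insert_of_contains d _ hc]
    simp [PySem.Set.contains, h]
  · have hc : d.contains (pvCountry code) = false := by
      by_contra hne
      exact h ((PySem.Dict.contains_iff_mem_keys d (pvCountry code)).mp (by simpa using hne))
    rw [hc]
    simp only [Bool.not_false, if_true]
    rw [PySem.Dict.keys_modify,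
      PySem.Dict.keys_insert_of_contains _ _ (PySem.Dict.contains_insert_self d _ []),
      PySem.Dict.keys_insert_of_not_contains d _ hc]
    simp [PySem.Set.contains, h]

-- A's whole grouping loop, on the key side, is the set-insertion fold of the country names
theorem pvFoldKeys (l : List String) (d : PySem.Dict String (List String)) :
    (l.foldl pvStep d).keys = l.foldl (fun s c => PySem.Set.add s (pvCountry c)) d.keys := by
  induction l generalizing d with
  | nil => rfl
  | cons x t ih => simp [List.foldl, ih, pvStepKeys]

-- a 4-character code passes is_airport_code (the excluded ids and the Z-rule only hit 3-letter codes)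
theorem pvLen4IsAirport (c : String) (h : c.toList.length = 4) : pvIsAirportCode c = true := by
  have h1 : c ≠ "" := by intro e; subst e; simp at h
  have h2 : c ≠ "ZAK" := by intro e; subst e; exact absurd h (by decide)
  have h3 : c ≠ "ZWY" := by intro e; subst e; exact absurd h (by decide)
  unfold pvIsAirportCode
  rw [PySem.Str.len_eq, h]
  simp [h1, h2, h3]

-- hence A's filter coincides with B's bare len == 4 test
theorem pvFilterEq (l : List String) :
    l.filter (fun c => pvIsAirportCode c && PySem.Str.len c == 4)
      = l.filter (fun c => PySem.Str.len c == 4) := by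
  apply List.filter_congr
  intro c _
  by_cases h : (PySem.Str.len c == 4) = true
  · have : c.toList.length = 4 := by
      rw [PySem.Str.len_eq] at h; exact_mod_cast (by exact_mod_cast (beq_iff_eq.mp h) : (c.toList.length : Int) = 4)
    simp [pvLen4IsAirport c this]
  · simp at h
    simp [h]

-- B's tag helper computes the same country name as A's inline expression
theorem pvTagCountry (c : String) : pvTag c = pvCountry c := rfl

-- the (country, code) order B sorts by, as a Prop relation
def pvRle (a b : String × String) : Prop := a.1 < b.1 ∨ (a.1 = b.1 ∧ a.2 ≤ b.2)

theorem pvRleTrans (a b c : String × String) (h1 : pvRle a b) (h2 : pvRle b c) : pvRle a c := by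
  rcases h1 with h1 | ⟨e1, l1⟩ <;> rcases h2 with h2 | ⟨e2, l2⟩
  · exact Or.inl (lt_trans h1 h2)
  · exact Or.inl (e2 ▸ h1)
  · exact Or.inl (e1 ▸ h2)
  · exact Or.inr ⟨e1.trans e2, le_trans l1 l2⟩

-- sorted2's comparison, related to pvRle
theorem pvBeforeTrue (a b : String × String)
    (h : (decide (a.1 < b.1) || !decide (b.1 < a.1) && decide (a.2 < b.2)) = true) : pvRle a b := by
  simp only [Bool.or_eq_true, Bool.and_eq_true, Bool.not_eq_true', decide_eq_true_eq,
    decide_eq_false_iff_not] at h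
  rcases h with h | ⟨h1, h2⟩
  · exact Or.inl h
  · rcases lt_or_eq_of_le (le_of_not_gt h1) with hlt | heq
    · exact Or.inl hlt
    · exact Or.inr ⟨heq, le_of_lt h2⟩

theorem pvBeforeFalse (a b : String × String)
    (h : (decide (a.1 < b.1) || !decide (b.1 < a.1) && decide (a.2 < b.2)) = false) : pvRle b a := by
  simp only [Bool.or_eq_false_iff, Bool.and_eq_false_iff, Bool.not_eq_false',
    decide_eq_true_eq, decide_eq_false_iff_not] at h
  rcases h with ⟨h1, h2 | h2⟩
  · exact Or.inl h2
  · rcases lt_or_eq_of_le (le_of_not_gt h1) with hlt | heq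
    · exact Or.inl hlt
    · exact Or.inr ⟨heq, le_of_not_gt h2⟩

-- insertion into an R-ordered list stays R-ordered (for sorted2's comparison and R = pvRle)
theorem pvInsertByPairwise (before : String × String → String × String → Bool)
    (hT : ∀ a b, before a b = true → pvRle a b)
    (hF : ∀ a b, before a b = false → pvRle b a)
    (x : String × String) (ys : List (String × String)) (hp : ys.Pairwise pvRle) :
    (PySem.List.insertBy before x ys).Pairwise pvRle := by
  induction ys with
  | nil => simp [PySem.List.insertBy]
  | cons y t ih =>
    rcases hp with - | ⟨hy, hpt⟩
    by_cases hb : before x y = true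
    · rw [PySem.List.insertBy, if_pos hb]
      refine List.Pairwise.cons ?_ (List.Pairwise.cons hy hpt)
      intro z hz
      rcases List.mem_cons.mp hz with rfl | hz'
      · exact hT _ _ hb
      · exact pvRleTrans _ _ _ (hT _ _ hb) (hy z hz')
    · rw [PySem.List.insertBy, if_neg hb]
      have hbf : before x y = false := by
        cases hv : before x y
        · rfl
        · exact absurd hv hb
      refine List.Pairwise.cons ?_ (ih hpt)
      intro z hz
      rcases (PySem.List.mem_insertBy before x z t).mp hz with rfl | hz'
      · exact hF _ _ hbf
      · exact hy z hz' 

theorem pvFoldlInsertByPairwise (before : String × String → String × String → Bool)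
    (hT : ∀ a b, before a b = true → pvRle a b)
    (hF : ∀ a b, before a b = false → pvRle b a)
    (l acc : List (String × String)) (hp : acc.Pairwise pvRle) :
    (l.foldl (fun acc x => PySem.List.insertBy before x acc) acc).Pairwise pvRle := by
  induction l generalizing acc with
  | nil => exact hp
  | cons x t ih => exact ih _ (pvInsertByPairwise before hT hF x acc hp)

-- B's sorted list is ordered by pvRle, hence its first components are nondecreasing
theorem pvSorted2Pairwise (l : List (String × String)) :
    (PySem.List.sorted2 l (fun t => t.1) (fun t => t.2) false).Pairwise pvRle := by
  show (l.foldl (fun acc x => PySem.List.insertBy _ x acc) []).Pairwise pvRle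
  exact pvFoldlInsertByPairwise _ pvBeforeTrue pvBeforeFalse l [] (by simp)

-- counting the runs of a fst-nondecreasing list counts its distinct first components
theorem pvRunsCount (l : List (String × String)) (hp : l.Pairwise (fun a b => a.1 ≤ b.1)) :
    pvGroupbyCount l = ((l.map Prod.fst).toFinset.card : Int) := by
  induction l with
  | nil => simp [pvGroupbyCount]
  | cons x t ih =>
    cases t with
    | nil => simp [pvGroupbyCount]
    | cons y t' =>
      rcases hp with - | ⟨hx, hpt⟩
      have ihy := ih hpt
      by_cases he : x.1 = y.1
      · rw [show pvGroupbyCount (x :: y :: t') = pvGroupbyCount (y :: t') by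
          simp [pvGroupbyCount, he]]
        rw [ihy]
        congr 2
        simp [List.toFinset_cons, he]
      · have hxy : x.1 < y.1 := lt_of_le_of_ne (hx y (by simp)) he
        have hnot : x.1 ∉ ((y :: t').map Prod.fst).toFinset := by
          simp only [List.map_cons, List.toFinset_cons, Finset.mem_insert, List.mem_toFinset,
            List.mem_map]
          rintro (h | ⟨z, hz, hzx⟩)
          · exact absurd h (ne_of_lt hxy)
          · rcases hpt with - | ⟨hy, -⟩
            exact absurd hzx (Ne.symm (ne_of_lt (lt_of_lt_of_le hxy (hy z hz))))
        rw [show pvGroupbyCount (x :: y :: t') = 1 + pvGroupbyCount (y :: t') by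
          simp [pvGroupbyCount, he]]
        rw [ihy, show ((x :: y :: t').map Prod.fst).toFinset
            = insert x.1 ((y :: t').map Prod.fst).toFinset by simp [List.toFinset_cons]]
        rw [Finset.card_insert_of_notMem hnot]
        push_cast
        ring

-- |set(xs)| is the Finset cardinality of xs's elements
theorem pvOfListLen (xs : List String) : (PySem.Set.ofList xs).length = xs.toFinset.card := by
  have hnd := PySem.Set.nodup_ofList xs
  have hfin : (PySem.Set.ofList xs).toFinset = xs.toFinset := by
    apply Finset.ext
    intro a
    simp [List.mem_toFinset, PySem.Set.mem_ofList]
  rw [← List.toFinset_card_of_nodup hnd, hfin]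

-- ===== VERDICT (by name: the statement is the Claim_ definition above) =====
theorem add_international_airports_spec : Claim_equal_add_international_airports := by
  intro facility groupings _
  unfold Spec_add_international_airports add_international_airports add_international_airports_alt
  have hfilter : pvIntlCodes facility
      = ((PySem.Dict.getD (PySem.Dict.mk facility) "nonNasFacilityIds" []).filter
          (fun c => PySem.Str.len c == 4)).map PySem.Str.upper := by
    show (((PySem.Dict.getD (PySem.Dict.mk facility) "nonNasFacilityIds" []).filter
        (fun c => pvIsAirportCode c && PySem.Str.len c == 4)).map PySem.Str.upper) = _
    rw [pvFilterEq]
  set codes' := (PySem.Dict.getD (PySem.Dict.mk facility) "nonNasFacilityIds" []).filter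
    (fun c => PySem.Str.len c == 4) with hcodes'
  -- B's value is the number of distinct country names of the admitted codes
  have hB : pvGroupbyCount (pvTagged facility)
      = (((codes'.map PySem.Str.upper).map pvCountry).toFinset.card : Int) := by
    unfold pvTagged
    rw [← hcodes']
    set pairs := codes'.map (fun c => (pvTag (PySem.Str.upper c), PySem.Str.upper c)) with hpairs
    have hsp := pvSorted2Pairwise pairs
    rw [pvRunsCount _ (hsp.imp (fun h => by
      rcases h with h | ⟨h, -⟩
      · exact le_of_lt h
      · exact le_of_eq h))]
    have hperm : ((PySem.List.sorted2 pairs (fun t => t.1) (fun t => t.2) false).map Prod.fst).Perm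
        (pairs.map Prod.fst) := (PySem.List.sorted2_perm pairs _ _ false).map Prod.fst
    have hfs : ((PySem.List.sorted2 pairs (fun t => t.1) (fun t => t.2) false).map Prod.fst).toFinset
        = (pairs.map Prod.fst).toFinset := by
      apply Finset.ext; intro a; simp [List.mem_toFinset, hperm.mem_iff]
    have hmap : pairs.map Prod.fst = (codes'.map PySem.Str.upper).map pvCountry := by
      simp [hpairs, List.map_map, Function.comp_def, pvTagCountry]
    rw [hfs, hmap]
  rw [hB]
  by_cases h : (pvIntlCodes facility).isEmpty
  · -- no admitted codes: both sides are 0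
    have hc0 : codes' = [] := by
      rw [hfilter] at h
      simpa using h
    simp [h, hc0]
  · -- A counts the sorted items of by_country; their number is the number of distinct countries
    simp only [h, if_false, Bool.false_eq_true]
    rw [pvFoldlCount]
    have hperm := PySem.List.sorted2_perm
      (xs := (pvIntlCodes facility).foldl pvStep (PySem.Dict.mk [])
        |>.items) (k1 := fun p => p.1) (k2 := fun p => p.2) (rev := false)
    rw [hperm.length_eq]
    have hkeys : ((pvIntlCodes facility).foldl pvStep (PySem.Dict.mk [])).keys
        = PySem.Set.ofList ((pvIntlCodes facility).map pvCountry) := by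
      rw [pvFoldKeys, PySem.Set.ofList_eq_foldl, List.foldl_map]
      rfl
    have hlen : ((pvIntlCodes facility).foldl pvStep (PySem.Dict.mk [])).items.length
        = ((pvIntlCodes facility).foldl pvStep (PySem.Dict.mk [])).keys.length := by
      simp [PySem.Dict.keys]
    rw [hlen, hkeys, pvOfListLen, hfilter]
    simp
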